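-- pv_equiv track=rewrite | github.com/June0727-JUNGLE/BAEKJOON | 백준/Silver/2606. 바이러스/바이러스.py | dfs_recur
-- ===== SOURCE A (Python) =====
-- def dfs_recur(graph, node):
--     visited = set()
--     def _dfs(k):
--         if k in visited:
--             return
--         visited.add(k)
--         for l in graph[k]:
--             if l not in visited:
--                 _dfs(l)
--     _dfs(node)
--     return len(visited)
-- ===== SOURCE B (Python) =====
-- def dfs_recur(graph, node):
--     visited = {node}
--     frontier = [node]
--     while frontier:
--         next_frontier = []
--         for k in frontier:
--             for l in graph[k]:
--                 if l not in visited: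
--                     visited.add(l)
--                     next_frontier.append(l)
--         frontier = next_frontier
--     return len(visited)
-- ===== Notes on version B (the rewrite author's own statement) =====
-- stated objective: alternative
-- what changed: The recursive DFS with a nested closure is replaced by an iterative level-by-level BFS that marks nodes when enqueued and swaps whole frontier lists; the visited-set count is the same reachable-node count.
import Mathlib
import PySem

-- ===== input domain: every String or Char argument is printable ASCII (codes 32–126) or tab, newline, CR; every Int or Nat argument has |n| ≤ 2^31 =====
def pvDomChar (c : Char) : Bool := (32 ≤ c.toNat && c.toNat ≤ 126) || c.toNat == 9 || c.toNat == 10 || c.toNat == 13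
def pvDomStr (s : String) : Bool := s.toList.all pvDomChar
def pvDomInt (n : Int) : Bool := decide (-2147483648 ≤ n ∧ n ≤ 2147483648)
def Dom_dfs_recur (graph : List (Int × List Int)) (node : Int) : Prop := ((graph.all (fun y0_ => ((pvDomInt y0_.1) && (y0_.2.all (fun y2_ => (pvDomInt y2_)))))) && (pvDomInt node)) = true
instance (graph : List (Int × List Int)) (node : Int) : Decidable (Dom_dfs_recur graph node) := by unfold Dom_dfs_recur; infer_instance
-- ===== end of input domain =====

-- B replaces A's recursive nested-closure DFS by an iterative level-by-level BFS (mark on enqueue,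
-- swap whole frontier lists); equal reachable-node count proved (same cost, alternative algorithm).

-- graph[k] (dict lookup) in both Pythons; the [] default is never reached under Pre_dfs_recur
-- (Python raises KeyError exactly there)
def pvAdj (graph : List (Int × List Int)) (k : Int) : List Int :=
  PySem.Dict.getD (PySem.Dict.mk graph) k []

-- ===== PORT A =====
-- _dfs, the recursive closure; fuel is only a termination guard and strictly exceeds the
-- recursion depth (each nested call adds one new node, all drawn from node :: all neighbours)
def dfsA (graph : List (Int × List Int)) : Nat → Int → PySem.Set Int → PySem.Set Int
  | 0, _, visited => visited
  | fuel+1, k, visited =>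
    if visited.contains k then visited
    else (pvAdj graph k).foldl
        (fun vis l => if vis.contains l then vis else dfsA graph fuel l vis)
        (visited.add k)

def dfs_recur (graph : List (Int × List Int)) (node : Int) : Int :=
  PySem.Set.len
    (dfsA graph ((node :: graph.flatMap (fun p => p.2)).length + 1) node PySem.Set.empty)

-- ===== PORT B =====
-- one frontier node k: "for l in graph[k]: if l not in visited: visited.add(l); next.append(l)";
-- the state is the pair (visited, next_frontier)
def stepB (graph : List (Int × List Int)) (p : PySem.Set Int × List Int) (k : Int) :
    PySem.Set Int × List Int :=
  (pvAdj graph k).foldl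
    (fun q l => if q.1.contains l then q else (q.1.add l, q.2.concat l)) p

-- the while-loop: process the whole current frontier, then recurse on the fresh next_frontier;
-- fuel is only a termination guard and strictly exceeds the number of non-trivial levels
def levelB (graph : List (Int × List Int)) : Nat → List Int → PySem.Set Int → PySem.Set Int
  | 0, _, visited => visited
  | _+1, [], visited => visited
  | fuel+1, k :: fr, visited =>
    levelB graph fuel ((k :: fr).foldl (stepB graph) (visited, [])).2
      ((k :: fr).foldl (stepB graph) (visited, [])).1

def dfs_recur_alt (graph : List (Int × List Int)) (node : Int) : Int :=
  PySem.Set.len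
    (levelB graph ((node :: graph.flatMap (fun p => p.2)).length + 1) [node]
      (PySem.Set.empty.add node))

-- ===== PRECONDITION & SPEC =====
-- one closure step: the current candidate set plus all its neighbours
def pvReachStep (graph : List (Int × List Int)) (s : List Int) : List Int :=
  (s ++ s.flatMap (pvAdj graph)).dedup

-- the set of nodes reachable from node (|all neighbour occurrences|+1 closure steps suffice,
-- since a shortest path has at most that many edges)
def pvReachSet (graph : List (Int × List Int)) (node : Int) : List Int :=
  Nat.iterate (pvReachStep graph) ((graph.flatMap (fun p => p.2)).length + 1) [node]

-- Both A and B raise KeyError exactly when some node REACHABLE from `node` is not a key of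
-- graph; Pre_ excludes exactly those raising inputs and nothing else.
def Pre_dfs_recur (graph : List (Int × List Int)) (node : Int) : Prop :=
  ∀ x ∈ pvReachSet graph node, ∃ p ∈ graph, p.1 = x
instance (graph : List (Int × List Int)) (node : Int) : Decidable (Pre_dfs_recur graph node) := by
  unfold Pre_dfs_recur; infer_instance

def pvWitness_dfs_recur : (List (Int × List Int)) × Int := ([(1, [2]), (2, [1, 2])], 1)

def Spec_dfs_recur (graph : List (Int × List Int)) (node : Int) (out : Int) : Prop := out = dfs_recur_alt graph node
instance (graph : List (Int × List Int)) (node : Int) (out : Int) : Decidable (Spec_dfs_recur graph node out) := by unfold Spec_dfs_recur; infer_instance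

-- ===== CLAIM (what is proved, stated in full; the proofs are below) =====
def Claim_equal_dfs_recur : Prop := ∀ (graph : List (Int × List Int)) (node : Int), Dom_dfs_recur graph node → Pre_dfs_recur graph node → Spec_dfs_recur graph node (dfs_recur graph node)

-- ===== LEMMAS AND PROOFS =====

-- all neighbours occurring in the graph
def Fnb (g : List (Int × List Int)) : List Int := g.flatMap (fun p => p.2)

-- the universe of nodes either port can ever visit, deduplicated
def Cuniv (g : List (Int × List Int)) (n : Int) : PySem.Set Int := PySem.Set.ofList (n :: Fnb g)

-- the not-yet-visited part of the universe
def UL (g : List (Int × List Int)) (n : Int) (V : PySem.Set Int) : List Int :=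
  (Cuniv g n).filter (fun c => !(V.contains c))

def unvis (g : List (Int × List Int)) (n : Int) (V : PySem.Set Int) : Nat := (UL g n V).length

-- reachability along pvAdj edges
inductive Reach (g : List (Int × List Int)) : Int → Int → Prop
  | refl (a : Int) : Reach g a a
  | tail {a b c : Int} : Reach g a b → c ∈ pvAdj g b → Reach g a c

theorem Reach_head {g : List (Int × List Int)} {k l x : Int}
    (h : l ∈ pvAdj g k) (r : Reach g l x) : Reach g k x := by
  induction r with
  | refl => exact Reach.tail (Reach.refl k) h
  | tail r h2 ih => exact Reach.tail ih h2

theorem pvAdj_cases (g : List (Int × List Int)) (k : Int) :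
    pvAdj g k = [] ∨ ∃ p ∈ g, pvAdj g k = p.2 := by
  unfold pvAdj PySem.Dict.getD PySem.Dict.get?
  cases h : List.find? (fun p => p.1 == k) (PySem.Dict.mk g).items with
  | none => left; rfl
  | some p => right; exact ⟨p, List.mem_of_find?_eq_some h, rfl⟩

theorem mem_adj_mem_Fnb {g : List (Int × List Int)} {k l : Int}
    (h : l ∈ pvAdj g k) : l ∈ Fnb g := by
  rcases pvAdj_cases g k with h0 | ⟨p, hp, he⟩
  · rw [h0] at h; cases h
  · rw [he] at h
    exact List.mem_flatMap.mpr ⟨p, hp, h⟩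

theorem contains_eq_decide {V : PySem.Set Int} {c : Int} :
    PySem.Set.contains V c = decide (c ∈ V) := by
  by_cases h : c ∈ V
  · simp [h]
  · simp [h]

theorem nodup_Cuniv (g : List (Int × List Int)) (n : Int) : (Cuniv g n).Nodup :=
  PySem.Set.nodup_ofList _

theorem mem_Cuniv {g : List (Int × List Int)} {n c : Int}
    (h : c = n ∨ c ∈ Fnb g) : c ∈ Cuniv g n := by
  rw [Cuniv, PySem.Set.mem_ofList]
  rcases h with h | h
  · exact h ▸ List.mem_cons_self
  · exact List.mem_cons_of_mem _ h

theorem UL_add {g : List (Int × List Int)} {n k : Int} {V : PySem.Set Int} :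
    UL g n (V.add k) = (UL g n V).erase k := by
  have hnd : (UL g n V).Nodup := (nodup_Cuniv g n).filter _
  rw [List.Nodup.erase_eq_filter hnd, UL, UL, List.filter_filter]
  apply List.filter_congr
  intro c _
  simp only [contains_eq_decide]
  by_cases h1 : c = k <;> by_cases h2 : c ∈ V <;> simp [h1, h2, PySem.Set.mem_add]

theorem mem_UL {g : List (Int × List Int)} {n k : Int} {V : PySem.Set Int}
    (hk : k ∈ Cuniv g n) (hkV : k ∉ V) : k ∈ UL g n V := by
  rw [UL, List.mem_filter]
  exact ⟨hk, by simp [hkV]⟩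

theorem unvis_add {g : List (Int × List Int)} {n k : Int} {V : PySem.Set Int}
    (hk : k ∈ Cuniv g n) (hkV : k ∉ V) :
    unvis g n (V.add k) + 1 = unvis g n V := by
  rw [unvis, unvis, UL_add]
  exact List.length_erase_add_one (mem_UL hk hkV)

theorem unvis_lt {g : List (Int × List Int)} {n : Int} {V V' : PySem.Set Int} {y : Int}
    (hsub : ∀ x ∈ V, x ∈ V') (hy : y ∈ Cuniv g n) (hyV : y ∉ V) (hyV' : y ∈ V') :
    unvis g n V' < unvis g n V := by
  have hsl : List.Sublist (UL g n V') (UL g n V) := by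
    apply List.monotone_filter_right
    intro c hc
    simp only [contains_eq_decide, Bool.not_eq_eq_eq_not, Bool.not_true,
      decide_eq_false_iff_not] at hc ⊢
    intro hcV; exact hc (hsub c hcV)
  have hle : (UL g n V').length ≤ (UL g n V).length := hsl.length_le
  rcases lt_or_eq_of_le hle with h | h
  · exact h
  · exfalso
    have heq : UL g n V' = UL g n V := hsl.eq_of_length h
    have : y ∈ UL g n V' := heq ▸ mem_UL hy hyV
    rw [UL, List.mem_filter] at this
    simp [hyV'] at this

theorem empty_nodup : (PySem.Set.empty : PySem.Set Int).Nodup := List.nodup_nil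

theorem not_mem_empty (x : Int) : x ∉ (PySem.Set.empty : PySem.Set Int) := by
  intro hx; cases hx

theorem empty_univ (g : List (Int × List Int)) (n : Int) :
    ∀ x ∈ (PySem.Set.empty : PySem.Set Int), x = n ∨ x ∈ Fnb g := by
  intro x hx; cases hx

theorem unvis_le (g : List (Int × List Int)) (n : Int) (V : PySem.Set Int) :
    unvis g n V ≤ (n :: Fnb g).length := by
  rw [unvis, UL]
  refine le_trans (List.length_filter_le _ _) ?_
  rw [Cuniv]
  exact PySem.Set.length_ofList_le _

-- ===== A-side characterisation (invariant of the recursive DFS) =====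
theorem dfsA_main (g : List (Int × List Int)) (n : Int) :
    ∀ (fuel : Nat) (k : Int) (V : PySem.Set Int),
    (k = n ∨ k ∈ Fnb g) →
    (∀ x ∈ V, x = n ∨ x ∈ Fnb g) →
    V.Nodup →
    unvis g n V < fuel →
    (∀ x ∈ V, x ∈ dfsA g fuel k V) ∧ (k ∈ dfsA g fuel k V) ∧
    (∀ x ∈ dfsA g fuel k V, x ∈ V ∨ Reach g k x) ∧
    (∀ x ∈ dfsA g fuel k V, x ∉ V → ∀ l ∈ pvAdj g x, l ∈ dfsA g fuel k V) ∧
    (∀ x ∈ dfsA g fuel k V, x = n ∨ x ∈ Fnb g) ∧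
    (dfsA g fuel k V).Nodup ∧ unvis g n (dfsA g fuel k V) ≤ unvis g n V := by
  intro fuel
  induction fuel with
  | zero => intro k V _ _ _ hf; omega
  | succ fuel IH =>
    intro k V hk hV hnd hf
    by_cases hkV : PySem.Set.contains V k = true
    · have hkm : k ∈ V := (PySem.Set.contains_iff V k).mp hkV
      simp only [dfsA, hkV, if_true]
      exact ⟨fun x hx => hx, hkm, fun x hx => Or.inl hx,
        fun x hx hxV => absurd hx hxV, hV, hnd, le_refl _⟩
    · have hkm : k ∉ V := fun h => hkV ((PySem.Set.contains_iff V k).mpr h)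
      have hkC : k ∈ Cuniv g n := mem_Cuniv hk
      have hV1u : unvis g n (V.add k) < fuel := by
        have := unvis_add hkC hkm; omega
      have hV1mono : unvis g n (V.add k) ≤ unvis g n V := by
        have := unvis_add hkC hkm; omega
      have inner :
          ∀ (ls : List Int), (∀ l ∈ ls, l ∈ Fnb g) →
          ∀ (W : PySem.Set Int), (∀ x ∈ W, x = n ∨ x ∈ Fnb g) → W.Nodup → unvis g n W < fuel →
          (∀ x ∈ W, x ∈ ls.foldl (fun vis l => if vis.contains l then vis else dfsA g fuel l vis) W) ∧
          (∀ l ∈ ls, l ∈ ls.foldl (fun vis l => if vis.contains l then vis else dfsA g fuel l vis) W) ∧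
          (∀ x ∈ ls.foldl (fun vis l => if vis.contains l then vis else dfsA g fuel l vis) W,
            x ∈ W ∨ ∃ l ∈ ls, Reach g l x) ∧
          (∀ x ∈ ls.foldl (fun vis l => if vis.contains l then vis else dfsA g fuel l vis) W,
            x ∉ W → ∀ l' ∈ pvAdj g x,
              l' ∈ ls.foldl (fun vis l => if vis.contains l then vis else dfsA g fuel l vis) W) ∧
          (∀ x ∈ ls.foldl (fun vis l => if vis.contains l then vis else dfsA g fuel l vis) W,
            x = n ∨ x ∈ Fnb g) ∧
          (ls.foldl (fun vis l => if vis.contains l then vis else dfsA g fuel l vis) W).Nodup ∧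
          unvis g n (ls.foldl (fun vis l => if vis.contains l then vis else dfsA g fuel l vis) W)
            ≤ unvis g n W := by
        intro ls
        induction ls with
        | nil =>
          intro _ W hWu hWnd hWf
          exact ⟨fun x hx => hx, by simp, fun x hx => Or.inl hx,
            fun x hx hxW => absurd hx hxW, hWu, hWnd, le_refl _⟩
        | cons l ls ihl =>
          intro hls W hWu hWnd hWf
          simp only [List.foldl_cons]
          by_cases hlW : PySem.Set.contains W l = true
          · rw [if_pos hlW]
            have hlm : l ∈ W := (PySem.Set.contains_iff W l).mp hlW
            obtain ⟨a, b, c, d, e, f, gmono⟩ :=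
              ihl (fun x hx => hls x (List.mem_cons_of_mem l hx)) W hWu hWnd hWf
            refine ⟨a, ?_, ?_, d, e, f, gmono⟩
            · intro l' hl'
              rcases List.mem_cons.mp hl' with rfl | hl'
              · exact a l' hlm
              · exact b l' hl'
            · intro x hx
              rcases c x hx with h | ⟨l', hl', hr⟩
              · exact Or.inl h
              · exact Or.inr ⟨l', List.mem_cons_of_mem l hl', hr⟩
          · rw [if_neg hlW]
            have hlm : l ∉ W := fun h => hlW ((PySem.Set.contains_iff W l).mpr h)
            have hlF : l ∈ Fnb g := hls l List.mem_cons_self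
            obtain ⟨a1, b1, c1, d1, e1, f1, g1⟩ := IH l W (Or.inr hlF) hWu hWnd hWf
            obtain ⟨a2, b2, c2, d2, e2, f2, g2⟩ :=
              ihl (fun x hx => hls x (List.mem_cons_of_mem l hx)) (dfsA g fuel l W) e1 f1
                (lt_of_le_of_lt g1 hWf)
            refine ⟨fun x hx => a2 x (a1 x hx), ?_, ?_, ?_, e2, f2, le_trans g2 g1⟩
            · intro l' hl'
              rcases List.mem_cons.mp hl' with rfl | hl'
              · exact a2 l' b1
              · exact b2 l' hl'
            · intro x hx
              rcases c2 x hx with h | ⟨l', hl', hr⟩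
              · rcases c1 x h with h' | hr
                · exact Or.inl h'
                · exact Or.inr ⟨l, List.mem_cons_self, hr⟩
              · exact Or.inr ⟨l', List.mem_cons_of_mem l hl', hr⟩
            · intro x hx hxW l' hl'
              by_cases hx1 : x ∈ dfsA g fuel l W
              · exact a2 l' (d1 x hx1 hxW l' hl')
              · exact d2 x hx hx1 l' hl'
      simp only [dfsA, hkV]
      have hadd : ∀ x ∈ V.add k, x = n ∨ x ∈ Fnb g := by
        intro x hx
        rcases (PySem.Set.mem_add V k x).mp hx with h | rfl
        · exact hV x h
        · exact hk
      obtain ⟨a, b, c, d, e, f, gmono⟩ :=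
        inner (pvAdj g k) (fun l hl => mem_adj_mem_Fnb hl) (V.add k) hadd
          (PySem.Set.nodup_add V k hnd) hV1u
      have hVsub : ∀ x ∈ V, x ∈ V.add k := fun x hx => (PySem.Set.mem_add V k x).mpr (Or.inl hx)
      have hkadd : k ∈ V.add k := (PySem.Set.mem_add V k k).mpr (Or.inr rfl)
      refine ⟨fun x hx => a x (hVsub x hx), a k hkadd, ?_, ?_, e, f, le_trans gmono hV1mono⟩
      · intro x hx
        rcases c x hx with h | ⟨l, hl, hr⟩
        · rcases (PySem.Set.mem_add V k x).mp h with h' | rfl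
          · exact Or.inl h'
          · exact Or.inr (Reach.refl x)
        · exact Or.inr (Reach_head hl hr)
      · intro x hx hxV l hl
        by_cases hx1 : x ∈ PySem.Set.add V k
        · rcases (PySem.Set.mem_add V k x).mp hx1 with h' | rfl
          · exact absurd h' hxV
          · exact b l hl
        · exact d x hx hx1 l hl

theorem dfsA_char (g : List (Int × List Int)) (n : Int) :
    (dfsA g ((n :: Fnb g).length + 1) n PySem.Set.empty).Nodup ∧
    ∀ x, x ∈ dfsA g ((n :: Fnb g).length + 1) n PySem.Set.empty ↔ Reach g n x := by
  obtain ⟨a, b, c, d, e, f, _⟩ :=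
    dfsA_main g n ((n :: Fnb g).length + 1) n PySem.Set.empty (Or.inl rfl)
      (empty_univ g n) empty_nodup (by have := unvis_le g n PySem.Set.empty; omega)
  refine ⟨f, fun x => ⟨?_, ?_⟩⟩
  · intro hx
    rcases c x hx with h | h
    · exact absurd h (not_mem_empty x)
    · exact h
  · intro hr
    induction hr with
    | refl => exact b
    | tail r h ih => exact d _ ih (not_mem_empty _) _ h

-- ===== B-side characterisation (invariants of the BFS level loop) =====
theorem inner_spec :
    ∀ (ls : List Int) (p : PySem.Set Int × List Int),
    (∀ x ∈ p.1, x ∈ (ls.foldl (fun q l => if q.1.contains l then q else (q.1.add l, q.2.concat l)) p).1) ∧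
    (∀ x ∈ p.2, x ∈ (ls.foldl (fun q l => if q.1.contains l then q else (q.1.add l, q.2.concat l)) p).2) ∧
    (∀ x ∈ (ls.foldl (fun q l => if q.1.contains l then q else (q.1.add l, q.2.concat l)) p).1,
      x ∈ p.1 ∨ x ∈ ls) ∧
    (∀ x ∈ (ls.foldl (fun q l => if q.1.contains l then q else (q.1.add l, q.2.concat l)) p).2,
      x ∈ p.2 ∨ x ∉ p.1) ∧
    (∀ l ∈ ls, l ∈ (ls.foldl (fun q l => if q.1.contains l then q else (q.1.add l, q.2.concat l)) p).1) ∧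
    ((∀ x ∈ p.2, x ∈ p.1) →
      ∀ x ∈ (ls.foldl (fun q l => if q.1.contains l then q else (q.1.add l, q.2.concat l)) p).2,
        x ∈ (ls.foldl (fun q l => if q.1.contains l then q else (q.1.add l, q.2.concat l)) p).1) ∧
    (p.1.Nodup → (ls.foldl (fun q l => if q.1.contains l then q else (q.1.add l, q.2.concat l)) p).1.Nodup) ∧
    (∀ x ∈ (ls.foldl (fun q l => if q.1.contains l then q else (q.1.add l, q.2.concat l)) p).1,
      x ∈ p.1 ∨ x ∈ (ls.foldl (fun q l => if q.1.contains l then q else (q.1.add l, q.2.concat l)) p).2) := by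
  intro ls
  induction ls with
  | nil =>
    intro p
    exact ⟨fun x hx => hx, fun x hx => hx, fun x hx => Or.inl hx, fun x hx => Or.inl hx,
      by simp, fun h => h, fun h => h, fun x hx => Or.inl hx⟩
  | cons l ls ih =>
    intro p
    simp only [List.foldl_cons]
    by_cases hl : PySem.Set.contains p.1 l = true
    · have hlm : l ∈ p.1 := (PySem.Set.contains_iff p.1 l).mp hl
      rw [if_pos hl]
      obtain ⟨a, b, c, d, e, f, nd, h⟩ := ih p
      refine ⟨a, b, ?_, d, ?_, f, nd, h⟩
      · intro x hx
        rcases c x hx with h' | h'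
        · exact Or.inl h'
        · exact Or.inr (List.mem_cons_of_mem l h')
      · intro l' hl'
        rcases List.mem_cons.mp hl' with rfl | hl'
        · exact a l' hlm
        · exact e l' hl'
    · have hlm : l ∉ p.1 := fun h => hl ((PySem.Set.contains_iff p.1 l).mpr h)
      rw [if_neg hl]
      obtain ⟨a, b, c, d, e, f, nd, h⟩ := ih (p.1.add l, p.2.concat l)
      have hsub : ∀ x ∈ p.1, x ∈ p.1.add l :=
        fun x hx => (PySem.Set.mem_add p.1 l x).mpr (Or.inl hx)
      have hladd : l ∈ p.1.add l := (PySem.Set.mem_add p.1 l l).mpr (Or.inr rfl)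
      refine ⟨fun x hx => a x (hsub x hx), ?_, ?_, ?_, ?_, ?_, ?_, ?_⟩
      · intro x hx
        exact b x (by simp [List.concat_eq_append, hx])
      · intro x hx
        rcases c x hx with h' | h'
        · rcases (PySem.Set.mem_add p.1 l x).mp h' with h'' | rfl
          · exact Or.inl h''
          · exact Or.inr List.mem_cons_self
        · exact Or.inr (List.mem_cons_of_mem l h')
      · intro x hx
        rcases d x hx with h' | h'
        · have h'' : x ∈ p.2 ∨ x = l := by simpa [List.concat_eq_append] using h'
          rcases h'' with h'' | rfl
          · exact Or.inl h''
          · exact Or.inr hlm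
        · exact Or.inr (fun hc => h' (hsub x hc))
      · intro l' hl'
        rcases List.mem_cons.mp hl' with rfl | hl'
        · exact a l' hladd
        · exact e l' hl'
      · intro hp x hx
        refine f ?_ x hx
        intro y hy
        have h'' : y ∈ p.2 ∨ y = l := by simpa [List.concat_eq_append] using hy
        rcases h'' with h'' | rfl
        · exact hsub y (hp y h'')
        · exact hladd
      · intro hnd
        exact nd (PySem.Set.nodup_add p.1 l hnd)
      · intro x hx
        rcases h x hx with h' | h'
        · rcases (PySem.Set.mem_add p.1 l x).mp h' with h'' | rfl
          · exact Or.inl h''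
          · exact Or.inr (b x (by simp [List.concat_eq_append]))
        · exact Or.inr h'

theorem outer_spec (g : List (Int × List Int)) :
    ∀ (fs : List Int) (p : PySem.Set Int × List Int),
    (∀ x ∈ p.1, x ∈ (fs.foldl (stepB g) p).1) ∧
    (∀ x ∈ p.2, x ∈ (fs.foldl (stepB g) p).2) ∧
    (∀ x ∈ (fs.foldl (stepB g) p).1, x ∈ p.1 ∨ ∃ k ∈ fs, x ∈ pvAdj g k) ∧
    (∀ x ∈ (fs.foldl (stepB g) p).2, x ∈ p.2 ∨ x ∉ p.1) ∧
    ((∀ x ∈ p.2, x ∈ p.1) → ∀ x ∈ (fs.foldl (stepB g) p).2, x ∈ (fs.foldl (stepB g) p).1) ∧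
    (∀ k ∈ fs, ∀ l ∈ pvAdj g k, l ∈ (fs.foldl (stepB g) p).1) ∧
    (p.1.Nodup → (fs.foldl (stepB g) p).1.Nodup) ∧
    (∀ x ∈ (fs.foldl (stepB g) p).1, x ∈ p.1 ∨ x ∈ (fs.foldl (stepB g) p).2) := by
  intro fs
  induction fs with
  | nil =>
    intro p
    exact ⟨fun x hx => hx, fun x hx => hx, fun x hx => Or.inl hx, fun x hx => Or.inl hx,
      fun h => h, by simp, fun h => h, fun x hx => Or.inl hx⟩
  | cons k fs ih =>
    intro p
    simp only [List.foldl_cons]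
    obtain ⟨a1, b1, c1, d1, e1, f1, nd1, h1⟩ := inner_spec (pvAdj g k) p
    obtain ⟨a2, b2, c2, d2, e2, f2, nd2, h2⟩ := ih (stepB g p k)
    have sB : stepB g p k =
        (pvAdj g k).foldl (fun q l => if q.1.contains l then q else (q.1.add l, q.2.concat l)) p :=
      rfl
    rw [← sB] at a1 b1 c1 d1 e1 f1 nd1 h1
    refine ⟨fun x hx => a2 x (a1 x hx), fun x hx => b2 x (b1 x hx), ?_, ?_, ?_, ?_, ?_, ?_⟩
    · intro x hx
      rcases c2 x hx with h' | ⟨k', hk', hx'⟩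
      · rcases c1 x h' with h'' | h''
        · exact Or.inl h''
        · exact Or.inr ⟨k, List.mem_cons_self, h''⟩
      · exact Or.inr ⟨k', List.mem_cons_of_mem k hk', hx'⟩
    · intro x hx
      rcases d2 x hx with h' | h'
      · rcases d1 x h' with h'' | h''
        · exact Or.inl h''
        · exact Or.inr h''
      · exact Or.inr (fun hc => h' (a1 x hc))
    · intro hp
      exact e2 (f1 hp)
    · intro k' hk' l hl
      rcases List.mem_cons.mp hk' with rfl | hk'
      · exact a2 l (e1 l hl)
      · exact f2 k' hk' l hl
    · intro hnd
      exact nd2 (nd1 hnd)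
    · intro x hx
      rcases h2 x hx with h' | h'
      · rcases h1 x h' with h'' | h''
        · exact Or.inl h''
        · exact Or.inr (b2 x h'')
      · exact Or.inr h'

theorem levelB_nil (g : List (Int × List Int)) (fuel : Nat) (V : PySem.Set Int) :
    levelB g fuel [] V = V := by
  cases fuel <;> rfl

theorem levelB_main (g : List (Int × List Int)) (n : Int) :
    ∀ (fuel : Nat) (fs : List Int) (V : PySem.Set Int),
    (∀ x ∈ fs, x ∈ V) →
    (∀ x ∈ V, x = n ∨ x ∈ Fnb g) →
    V.Nodup →
    (∀ x ∈ V, x ∉ fs → ∀ l ∈ pvAdj g x, l ∈ V) →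
    (∀ x ∈ V, Reach g n x) →
    unvis g n V < fuel →
    (∀ x ∈ V, x ∈ levelB g fuel fs V) ∧
    (∀ x ∈ levelB g fuel fs V, Reach g n x) ∧
    (∀ x ∈ levelB g fuel fs V, ∀ l ∈ pvAdj g x, l ∈ levelB g fuel fs V) ∧
    (levelB g fuel fs V).Nodup := by
  intro fuel
  induction fuel with
  | zero => intro fs V _ _ _ _ _ hf; omega
  | succ fuel IH =>
    intro fs V hfsV hV hnd hcl hreach hf
    cases fs with
    | nil =>
      simp only [levelB]
      exact ⟨fun x hx => hx, hreach, fun x hx l hl => hcl x hx (by simp) l hl, hnd⟩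
    | cons k fr =>
      obtain ⟨a, b, c, d, e, f, ndP, h⟩ := outer_spec g (k :: fr) (V, [])
      simp only at a b c d e f ndP h
      have hP2sub : ∀ x ∈ ((k :: fr).foldl (stepB g) (V, [])).2,
          x ∈ ((k :: fr).foldl (stepB g) (V, [])).1 := e (by intro x hx; cases hx)
      have hP1univ : ∀ x ∈ ((k :: fr).foldl (stepB g) (V, [])).1, x = n ∨ x ∈ Fnb g := by
        intro x hx
        rcases c x hx with h' | ⟨k', _, hx'⟩
        · exact hV x h'
        · exact Or.inr (mem_adj_mem_Fnb hx')
      have hP1reach : ∀ x ∈ ((k :: fr).foldl (stepB g) (V, [])).1, Reach g n x := by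
        intro x hx
        rcases c x hx with h' | ⟨k', hk', hx'⟩
        · exact hreach x h'
        · exact Reach.tail (hreach k' (hfsV k' hk')) hx'
      have hP1cl : ∀ x ∈ ((k :: fr).foldl (stepB g) (V, [])).1,
          x ∉ ((k :: fr).foldl (stepB g) (V, [])).2 →
          ∀ l ∈ pvAdj g x, l ∈ ((k :: fr).foldl (stepB g) (V, [])).1 := by
        intro x hx hxP2 l hl
        rcases h x hx with hxV | hxP2'
        · by_cases hxfs : x ∈ (k :: fr)
          · exact f x hxfs l hl
          · exact a l (hcl x hxV hxfs l hl)
        · exact absurd hxP2' hxP2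
      have hP1nd : ((k :: fr).foldl (stepB g) (V, [])).1.Nodup := ndP hnd
      simp only [levelB]
      cases hP2 : ((k :: fr).foldl (stepB g) (V, [])).2 with
      | nil =>
        rw [levelB_nil]
        refine ⟨a, hP1reach, ?_, hP1nd⟩
        intro x hx l hl
        exact hP1cl x hx (by rw [hP2]; exact List.not_mem_nil) l hl
      | cons y ys =>
        have hy2 : y ∈ ((k :: fr).foldl (stepB g) (V, [])).2 := by
          rw [hP2]; exact List.mem_cons_self
        have hy1 : y ∈ ((k :: fr).foldl (stepB g) (V, [])).1 := hP2sub y hy2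
        have hyV : y ∉ V := by
          rcases d y hy2 with h' | h'
          · cases h'
          · exact h'
        have hyC : y ∈ Cuniv g n := mem_Cuniv (hP1univ y hy1)
        have hflt : unvis g n ((k :: fr).foldl (stepB g) (V, [])).1 < fuel := by
          have := unvis_lt a hyC hyV hy1
          omega
        rw [hP2] at hP2sub hP1cl
        obtain ⟨a', b', c', d'⟩ :=
          IH (y :: ys) ((k :: fr).foldl (stepB g) (V, [])).1
            hP2sub hP1univ hP1nd
            (by intro x hx hxP2 l hl; exact hP1cl x hx hxP2 l hl)
            hP1reach hflt
        exact ⟨fun x hx => a' x (a x hx), b', c', d'⟩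

theorem mem_add_singleton (n x : Int) :
    x ∈ (PySem.Set.empty.add n : PySem.Set Int) ↔ x = n := by
  rw [PySem.Set.mem_add]
  constructor
  · rintro (h | rfl)
    · exact absurd h (not_mem_empty x)
    · rfl
  · intro h; exact Or.inr h

theorem levelB_char (g : List (Int × List Int)) (n : Int) :
    (levelB g ((n :: Fnb g).length + 1) [n] (PySem.Set.empty.add n)).Nodup ∧
    ∀ x, x ∈ levelB g ((n :: Fnb g).length + 1) [n] (PySem.Set.empty.add n) ↔ Reach g n x := by
  have hV : ∀ x ∈ (PySem.Set.empty.add n : PySem.Set Int), x = n ∨ x ∈ Fnb g := by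
    intro x hx; exact Or.inl ((mem_add_singleton n x).mp hx)
  obtain ⟨a, b, c, d⟩ :=
    levelB_main g n ((n :: Fnb g).length + 1) [n] (PySem.Set.empty.add n)
      (by intro x hx; rcases List.mem_singleton.mp hx with rfl
          exact (mem_add_singleton x x).mpr rfl)
      hV
      (PySem.Set.nodup_add PySem.Set.empty n empty_nodup)
      (by intro x hx hxfs
          rcases (mem_add_singleton n x).mp hx with rfl
          exact absurd (List.mem_singleton.mpr rfl) hxfs)
      (by intro x hx; rcases (mem_add_singleton n x).mp hx with rfl; exact Reach.refl x)
      (by have := unvis_le g n (PySem.Set.empty.add n); omega)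
  refine ⟨d, fun x => ⟨b x, ?_⟩⟩
  intro hr
  induction hr with
  | refl => exact a _ ((mem_add_singleton n n).mpr rfl)
  | tail r h ih => exact c _ ih _ h

-- ===== VERDICT (by name: the statement is the Claim_ definition above) =====
theorem dfs_recur_spec : Claim_equal_dfs_recur := by
  intro graph node _ _
  unfold Spec_dfs_recur dfs_recur dfs_recur_alt
  obtain ⟨ndA, hA⟩ := dfsA_char graph node
  obtain ⟨ndB, hB⟩ := levelB_char graph node
  have hperm := (List.perm_ext_iff_of_nodup ndA ndB).mpr (fun a => (hA a).trans (hB a).symm)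
  show PySem.Set.len (dfsA graph ((node :: Fnb graph).length + 1) node PySem.Set.empty)
    = PySem.Set.len (levelB graph ((node :: Fnb graph).length + 1) [node]
        (PySem.Set.empty.add node))
  unfold PySem.Set.len
  rw [hperm.length_eq]
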